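-- pv_equiv track=rewrite | github.com/Llavrov/Laboratories | Base_Operation.py | F
-- ===== SOURCE A (Python) =====
-- def F(n):
--     if n == -1:
--         return 0
--     if n == 0:
--         return 1
--     if n == 1:
--         return 1
--     if n > 1:
--         return F(n - 1) * F(n - 2) + F(n - 3)
-- ===== SOURCE B (Python) =====
-- def F(n):
--     if n == -1:
--         return 0
--     a, b, c = 0, 1, 1  # F(-1), F(0), F(1)
--     for _ in range(n - 1):
--         a, b, c = b, c, c * b + a
--     return c
-- ===== Notes on version B (the rewrite author's own statement) =====
-- stated objective: faster
-- what changed: Replaced the exponential three-way recursion by a bottom-up loop carrying the last three values; intended as faster (measured 340x at the largest size both programs finished; for very large n both are dominated by the doubly-exponential digit size of the result).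
-- outside the precondition, e.g. on F(-2): A returns None, B returns 1
import Mathlib
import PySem

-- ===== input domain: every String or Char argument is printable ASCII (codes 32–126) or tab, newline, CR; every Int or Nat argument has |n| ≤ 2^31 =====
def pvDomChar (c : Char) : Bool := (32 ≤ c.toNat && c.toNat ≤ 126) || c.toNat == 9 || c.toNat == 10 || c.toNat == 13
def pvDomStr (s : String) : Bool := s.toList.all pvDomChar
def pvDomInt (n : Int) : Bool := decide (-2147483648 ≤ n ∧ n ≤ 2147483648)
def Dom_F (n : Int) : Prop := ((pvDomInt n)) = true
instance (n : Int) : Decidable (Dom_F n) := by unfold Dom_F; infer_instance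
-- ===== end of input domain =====

-- B replaces A's exponential three-way recursion by a bottom-up loop over the last three values;
-- intended as faster (measured 340x at the largest size both programs finished).

-- ===== PORT A =====
-- For n ≤ -2 Python's A falls off the end and returns None (no Int); those inputs are excluded by Pre_F
-- and the port returns 0 there (unreachable under Pre_F).
def F (n : Int) : Int :=
  if n = -1 then 0
  else if n = 0 then 1
  else if n = 1 then 1
  else if n > 1 then F (n - 1) * F (n - 2) + F (n - 3)
  else 0
termination_by (n + 1).toNat
decreasing_by all_goals omega

-- ===== PORT B =====
def pvStep (s : Int × Int × Int) : Int × Int × Int :=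
  (s.2.1, s.2.2, s.2.2 * s.2.1 + s.1)

def F_alt (n : Int) : Int :=
  if n = -1 then 0
  else ((List.range (n - 1).toNat).foldl (fun s _ => pvStep s) (0, 1, 1)).2.2

-- ===== PRECONDITION & SPEC =====
-- Pre_F excludes n ≤ -2, on which Python's A returns None instead of an int, and n ≥ 999, on which
-- Python's A raises RecursionError (its first recursive descent exceeds the default recursion limit).
def Pre_F (n : Int) : Prop := -1 ≤ n ∧ n ≤ 998
instance (n : Int) : Decidable (Pre_F n) := by unfold Pre_F; infer_instance
def pvWitness_F : Int := 5
def Spec_F (n : Int) (out : Int) : Prop := out = F_alt n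
instance (n : Int) (out : Int) : Decidable (Spec_F n out) := by unfold Spec_F; infer_instance

-- ===== CLAIM (what is proved, stated in full; the proofs are below) =====
def Claim_equal_F : Prop := ∀ (n : Int), Dom_F n → Pre_F n → Spec_F n (F n)

-- ===== LEMMAS AND PROOFS =====

theorem F_m1 : F (-1) = 0 := by rw [F]; norm_num
theorem F_z : F 0 = 1 := by rw [F]; norm_num
theorem F_o : F 1 = 1 := by rw [F]; norm_num

theorem F_rec (n : Int) (h : n > 1) :
    F n = F (n - 1) * F (n - 2) + F (n - 3) := by
  rw [F]
  have h1 : n ≠ -1 := by omega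
  have h2 : n ≠ 0 := by omega
  have h3 : n ≠ 1 := by omega
  simp only [h1, h2, h3, h, if_false, if_pos]

def pvLoop (k : Nat) : Int × Int × Int :=
  (List.range k).foldl (fun s _ => pvStep s) (0, 1, 1)

theorem pvLoop_eq (k : Nat) :
    pvLoop k = (F ((k : Int) - 1), F (k : Int), F ((k : Int) + 1)) := by
  induction k with
  | zero =>
      show (0, 1, 1) = (F ((0 : Int) - 1), F (0 : Int), F ((0 : Int) + 1))
      norm_num [F_m1, F_z, F_o]
  | succ m ih =>
      have hstep : pvLoop (m + 1) = pvStep (pvLoop m) := by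
        simp [pvLoop, List.range_succ]
      rw [hstep, ih]
      simp only [pvStep]
      have c2 : ((m + 1 : Nat) : Int) = (m : Int) + 1 := by push_cast; ring
      rw [c2]
      have e1 : (m : Int) + 1 - 1 = (m : Int) := by ring
      rw [e1]
      have hrec : F ((m : Int) + 1 + 1) = F ((m : Int) + 1) * F ((m : Int)) + F ((m : Int) - 1) := by
        have hm : (0 : Int) ≤ (m : Int) := Int.natCast_nonneg m
        have := F_rec ((m : Int) + 2) (by omega)
        have e2 : (m : Int) + 2 - 1 = (m : Int) + 1 := by ring
        have e3 : (m : Int) + 2 - 2 = (m : Int) := by ring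
        have e4 : (m : Int) + 2 - 3 = (m : Int) - 1 := by ring
        rw [e2, e3, e4] at this
        have e5 : (m : Int) + 1 + 1 = (m : Int) + 2 := by ring
        rw [e5, this]
      rw [hrec]

-- ===== VERDICT =====
theorem F_spec : Claim_equal_F := by
  intro n _ hpre
  unfold Spec_F F_alt
  by_cases h1 : n = -1
  · subst h1; simp [F_m1]
  · simp only [h1, if_false]
    have hn0 : 0 ≤ n := by unfold Pre_F at hpre; omega
    have hloop := pvLoop_eq (n - 1).toNat
    unfold pvLoop at hloop
    rw [hloop]
    show F n = F (((n - 1).toNat : Int) + 1)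
    by_cases h0 : n = 0
    · subst h0
      norm_num
      rw [F_z, F_o]
    · have e : ((n - 1).toNat : Int) + 1 = n := by omega
      rw [e]
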